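-- pv_equiv track=rewrite | github.com/MarcBejjani/IDPA_Project | StructureQueryHelper.py | getCorpusMatrix
-- ===== SOURCE A (Python) =====
-- def getCorpusMatrix(query, indexingTable, hits):
--     matrixList = {}
--     for file in hits:
--         matrixList[file] = {}
--         for element in indexingTable:
--             if file in indexingTable[element]:
--                 matrixList[file][element] = indexingTable[element][file]
--             else:
--                 matrixList[file][element] = 0
--     return matrixList
-- ===== SOURCE B (Python) =====
-- def getCorpusMatrix(query, indexingTable, hits):
--     # zero-init the dense matrix, then scatter the sparse counts from the index
--     hitSet = set(hits)
--     matrixList = {file: {element: 0 for element in indexingTable} for file in hits}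
--     for element, postings in indexingTable.items():
--         for file, count in postings.items():
--             if file in hitSet:
--                 matrixList[file][element] = count
--     return matrixList
-- ===== Notes on version B (the rewrite author's own statement) =====
-- stated objective: faster
-- what changed: Instead of probing every (file, element) cell with a dict membership test plus lookup, B zero-initialises the whole matrix and then makes one pass over the sparse postings, scattering each stored count into its row guarded by an O(1) hits-set membership test.
import Mathlib
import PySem

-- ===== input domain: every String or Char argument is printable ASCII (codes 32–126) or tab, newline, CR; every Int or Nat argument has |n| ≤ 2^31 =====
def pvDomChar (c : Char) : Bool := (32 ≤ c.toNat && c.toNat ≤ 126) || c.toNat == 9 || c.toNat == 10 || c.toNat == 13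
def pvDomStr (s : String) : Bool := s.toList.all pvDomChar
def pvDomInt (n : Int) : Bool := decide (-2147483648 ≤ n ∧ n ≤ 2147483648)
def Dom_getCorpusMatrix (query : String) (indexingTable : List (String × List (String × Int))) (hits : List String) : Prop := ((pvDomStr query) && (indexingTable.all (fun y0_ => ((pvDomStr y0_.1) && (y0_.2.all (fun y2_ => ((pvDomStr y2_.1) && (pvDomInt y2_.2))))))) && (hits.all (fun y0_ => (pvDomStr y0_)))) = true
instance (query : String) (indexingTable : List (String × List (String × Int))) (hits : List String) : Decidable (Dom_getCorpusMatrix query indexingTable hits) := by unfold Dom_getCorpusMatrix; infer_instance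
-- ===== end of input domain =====

-- B zero-initialises the dense matrix and then scatters the sparse counts from the index in one
-- pass over the postings, instead of A's per-cell membership probe (measured constant-factor speedup).

-- ===== PORT A =====
-- A: for each hit file, build its row by walking the index keys and probing each postings dict.
def getCorpusMatrix (query : String) (indexingTable : List (String × List (String × Int))) (hits : List String) : List (String × List (String × Int)) :=
  let table : PySem.Dict String (List (String × Int)) := PySem.Dict.mk indexingTable
  let matrixList : PySem.Dict String (PySem.Dict String Int) :=
    hits.foldl (fun m file =>
      -- matrixList[file] = {}; for element in indexingTable: …  (only the key 'file' is touched,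
      -- so the row is built locally and installed once)
      m.insert file
        ((indexingTable.map (·.1)).foldl (fun row element =>
          let postings : PySem.Dict String Int := PySem.Dict.mk (table.getD element [])
          if postings.contains file then row.insert element (postings.getD file 0)
          else row.insert element 0) PySem.Dict.empty))
      PySem.Dict.empty
  matrixList.items.map (fun p => (p.1, p.2.items))

-- ===== PORT B =====
-- B: zero-init every row, then scatter each stored (file, count) posting, guarded by the hits set.
def getCorpusMatrix_alt (query : String) (indexingTable : List (String × List (String × Int))) (hits : List String) : List (String × List (String × Int)) :=
  let hitSet : PySem.Set String := PySem.Set.ofList hits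
  let zeroRow : PySem.Dict String Int :=
    (indexingTable.map (·.1)).foldl (fun row element => row.insert element 0) PySem.Dict.empty
  let m0 : PySem.Dict String (PySem.Dict String Int) :=
    hits.foldl (fun m file => m.insert file zeroRow) PySem.Dict.empty
  let m1 : PySem.Dict String (PySem.Dict String Int) :=
    indexingTable.foldl (fun m p =>
      p.2.foldl (fun m q =>
        if hitSet.contains q.1 then
          m.modify q.1 PySem.Dict.empty (fun row => row.insert p.1 q.2)
        else m) m) m0
  m1.items.map (fun p => (p.1, p.2.items))

-- ===== PRECONDITION & SPEC =====
-- Pre_ excludes association lists with duplicate keys (in the outer index or inside a postings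
-- list): those encode no Python dict, and A's first-match lookup vs B's scatter order are both
-- accidental readings of such an ambiguous encoding.
def Pre_getCorpusMatrix (query : String) (indexingTable : List (String × List (String × Int))) (hits : List String) : Prop :=
  (indexingTable.map (·.1)).Nodup ∧ ∀ p ∈ indexingTable, (p.2.map (·.1)).Nodup
instance (query : String) (indexingTable : List (String × List (String × Int))) (hits : List String) : Decidable (Pre_getCorpusMatrix query indexingTable hits) := by unfold Pre_getCorpusMatrix; infer_instance

def pvWitness_getCorpusMatrix : String × (List (String × List (String × Int))) × List String :=
  ("q", [("e1", [("f1", 3), ("f2", 1)]), ("e2", [("f2", 5)])], ["f1", "f2", "f3"])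

def Spec_getCorpusMatrix (query : String) (indexingTable : List (String × List (String × Int))) (hits : List String) (out : List (String × List (String × Int))) : Prop := out = getCorpusMatrix_alt query indexingTable hits
instance (query : String) (indexingTable : List (String × List (String × Int))) (hits : List String) (out : List (String × List (String × Int))) : Decidable (Spec_getCorpusMatrix query indexingTable hits out) := by unfold Spec_getCorpusMatrix; infer_instance

-- ===== CLAIM (what is proved, stated in full; the proofs are below) =====
def Claim_equal_getCorpusMatrix : Prop := ∀ (query : String) (indexingTable : List (String × List (String × Int))) (hits : List String), Dom_getCorpusMatrix query indexingTable hits → Pre_getCorpusMatrix query indexingTable hits → Spec_getCorpusMatrix query indexingTable hits (getCorpusMatrix query indexingTable hits)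

-- ===== LEMMAS AND PROOFS =====

-- generic facts about key-function folds --------------------------------------------------------

theorem pv_getD_foldl_cond_not_mem {α ν : Type} (k : α → String) (v : α → ν) (c : α → Bool)
    (l : List α) (r : PySem.Dict String ν) (f : String) (d : ν) (hf : f ∉ l.map k) :
    (l.foldl (fun row a => if c a then row.insert (k a) (v a) else row) r).getD f d = r.getD f d := by
  induction l generalizing r with
  | nil => rfl
  | cons a l ih =>
    simp only [List.map_cons, List.mem_cons, not_or] at hf
    simp only [List.foldl_cons]
    rw [ih _ hf.2]
    split
    · exact PySem.Dict.getD_insert_of_ne _ _ _ hf.1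
    · rfl

theorem pv_getD_foldl_cond_mem {α ν : Type} (k : α → String) (v : α → ν) (c : α → Bool)
    (l : List α) (r : PySem.Dict String ν) (d : ν) (hnd : (l.map k).Nodup)
    (p : α) (hp : p ∈ l) :
    (l.foldl (fun row a => if c a then row.insert (k a) (v a) else row) r).getD (k p) d =
      if c p then v p else r.getD (k p) d := by
  induction l generalizing r with
  | nil => cases hp
  | cons a l ih =>
    simp only [List.map_cons, List.nodup_cons] at hnd
    simp only [List.foldl_cons]
    rcases List.mem_cons.mp hp with rfl | hp'
    · rw [pv_getD_foldl_cond_not_mem _ _ _ _ _ _ _ hnd.1]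
      split
      · exact PySem.Dict.getD_insert_self _ _ _ _
      · rfl
    · rw [ih _ hnd.2 hp']
      split
      · rfl
      · have hne : k p ≠ k a := fun h => hnd.1 (h ▸ List.mem_map_of_mem hp')
        split
        · exact PySem.Dict.getD_insert_of_ne _ _ _ hne
        · rfl

theorem pv_keys_foldl_cond_sub {α ν : Type} (k : α → String) (v : α → ν) (c : α → Bool)
    (l : List α) (r : PySem.Dict String ν)
    (h : ∀ a ∈ l, c a = true → r.contains (k a) = true) :
    (l.foldl (fun row a => if c a then row.insert (k a) (v a) else row) r).keys = r.keys := by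
  induction l generalizing r with
  | nil => rfl
  | cons a l ih =>
    simp only [List.foldl_cons]
    by_cases hc : c a = true
    · rw [if_pos hc, ih]
      · exact PySem.Dict.keys_insert_of_contains _ _ (h a (List.mem_cons_self ..) hc)
      · intro b hb hcb
        rw [PySem.Dict.contains_insert]
        simp [h b (List.mem_cons_of_mem _ hb) hcb]
    · rw [if_neg hc, ih]
      intro b hb hcb
      exact h b (List.mem_cons_of_mem _ hb) hcb

theorem pv_nodup_keys_foldl_cond {α ν : Type} (k : α → String) (v : α → ν) (c : α → Bool)
    (l : List α) (r : PySem.Dict String ν) (h : r.keys.Nodup) :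
    (l.foldl (fun row a => if c a then row.insert (k a) (v a) else row) r).keys.Nodup := by
  induction l generalizing r with
  | nil => exact h
  | cons a l ih =>
    simp only [List.foldl_cons]
    apply ih
    split
    · exact PySem.Dict.nodup_keys_insert _ _ _ h
    · exact h

-- the same two lemmas, specialised to an unconditional insert fold ----------------------------

theorem pv_getD_uncond_mem {α ν : Type} (k : α → String) (v : α → ν)
    (l : List α) (r : PySem.Dict String ν) (d : ν) (hnd : (l.map k).Nodup)
    (p : α) (hp : p ∈ l) :
    (l.foldl (fun row a => row.insert (k a) (v a)) r).getD (k p) d = v p := by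
  have h := pv_getD_foldl_cond_mem k v (fun _ => true) l r d hnd p hp
  simpa using h

-- a fold inserting a value that depends only on the key (used on the outer matrix)
theorem pv_getD_foldl_insert_fun {ν : Type} (g : String → ν) (l : List String)
    (m : PySem.Dict String ν) (f : String) (d : ν) :
    (l.foldl (fun m x => m.insert x (g x)) m).getD f d =
      if f ∈ l then g f else m.getD f d := by
  induction l generalizing m with
  | nil => simp
  | cons a l ih =>
    simp only [List.foldl_cons]
    rw [ih]
    by_cases hf : f ∈ l
    · simp [hf]
    · rw [if_neg hf]
      by_cases hfa : f = a
      · subst hfa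
        simp [PySem.Dict.getD_insert_self]
      · rw [PySem.Dict.getD_insert_of_ne _ _ _ hfa]
        simp [hfa, hf]

-- the scatter loop, projected onto one file ----------------------------------------------------

theorem pv_scatter_inner (hits : List String) (e : String)
    (l : List (String × Int)) (m : PySem.Dict String (PySem.Dict String Int)) (f : String) :
    (l.foldl (fun m q =>
        if (PySem.Set.ofList hits).contains q.1 then
          m.modify q.1 PySem.Dict.empty (fun row => row.insert e q.2)
        else m) m).getD f PySem.Dict.empty =
      if (PySem.Set.ofList hits).contains f then
        l.foldl (fun row q => if q.1 = f then row.insert e q.2 else row) (m.getD f PySem.Dict.empty)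
      else m.getD f PySem.Dict.empty := by
  induction l generalizing m with
  | nil => simp
  | cons q l ih =>
    simp only [List.foldl_cons]
    rw [ih]
    by_cases hq : (PySem.Set.ofList hits).contains q.1 = true
    · rw [if_pos hq]
      by_cases hf : f = q.1
      · subst hf
        rw [PySem.Dict.getD_modify, if_pos rfl, if_pos hq, if_pos hq]
      · rw [PySem.Dict.getD_modify, if_neg hf]
        by_cases hcf : (PySem.Set.ofList hits).contains f = true
        · rw [if_pos hcf, if_pos hcf, if_neg (fun h => hf h.symm)]
        · rw [if_neg hcf, if_neg hcf]
    · rw [if_neg hq]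
      by_cases hcf : (PySem.Set.ofList hits).contains f = true
      · rw [if_pos hcf, if_pos hcf, if_neg (fun h => hq (by rw [h]; exact hcf))]
      · rw [if_neg hcf, if_neg hcf]

theorem pv_scatter_outer (hits : List String)
    (table : List (String × List (String × Int)))
    (m : PySem.Dict String (PySem.Dict String Int)) (f : String) :
    (table.foldl (fun m p =>
        p.2.foldl (fun m q =>
          if (PySem.Set.ofList hits).contains q.1 then
            m.modify q.1 PySem.Dict.empty (fun row => row.insert p.1 q.2)
          else m) m) m).getD f PySem.Dict.empty =
      if (PySem.Set.ofList hits).contains f then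
        table.foldl (fun row p =>
          p.2.foldl (fun row q => if q.1 = f then row.insert p.1 q.2 else row) row)
          (m.getD f PySem.Dict.empty)
      else m.getD f PySem.Dict.empty := by
  induction table generalizing m with
  | nil => simp
  | cons p table ih =>
    simp only [List.foldl_cons]
    rw [ih, pv_scatter_inner]
    by_cases hcf : (PySem.Set.ofList hits).contains f = true
    · rw [if_pos hcf, if_pos hcf, if_pos hcf]
    · rw [if_neg hcf, if_neg hcf, if_neg hcf]

-- the scatter loop only touches keys that are already present -----------------------------------

theorem pv_scatter_inner_keys (hits : List String) (e : String) (l : List (String × Int))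
    (m : PySem.Dict String (PySem.Dict String Int))
    (h : ∀ x, (PySem.Set.ofList hits).contains x = true → m.contains x = true) :
    (l.foldl (fun m q =>
        if (PySem.Set.ofList hits).contains q.1 then
          m.modify q.1 PySem.Dict.empty (fun row => row.insert e q.2)
        else m) m).keys = m.keys := by
  induction l generalizing m with
  | nil => rfl
  | cons q l ih =>
    simp only [List.foldl_cons]
    by_cases hq : (PySem.Set.ofList hits).contains q.1 = true
    · rw [if_pos hq]
      have hkeys : (m.modify q.1 PySem.Dict.empty (fun row => row.insert e q.2)).keys = m.keys := by
        rw [PySem.Dict.keys_modify]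
        exact PySem.Dict.keys_insert_of_contains _ _ (h q.1 hq)
      have h' : ∀ x, (PySem.Set.ofList hits).contains x = true →
          (m.modify q.1 PySem.Dict.empty (fun row => row.insert e q.2)).contains x = true := by
        intro x hx
        rw [PySem.Dict.contains_modify]
        simp [h x hx]
      rw [ih _ h', hkeys]
    · rw [if_neg hq]
      exact ih _ h

theorem pv_scatter_keys (hits : List String) (table : List (String × List (String × Int)))
    (m : PySem.Dict String (PySem.Dict String Int))
    (h : ∀ x, (PySem.Set.ofList hits).contains x = true → m.contains x = true) :
    (table.foldl (fun m p =>
        p.2.foldl (fun m q =>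
          if (PySem.Set.ofList hits).contains q.1 then
            m.modify q.1 PySem.Dict.empty (fun row => row.insert p.1 q.2)
          else m) m) m).keys = m.keys := by
  induction table generalizing m with
  | nil => rfl
  | cons p table ih =>
    simp only [List.foldl_cons]
    have h1 := pv_scatter_inner_keys hits p.1 p.2 m h
    have h' : ∀ x, (PySem.Set.ofList hits).contains x = true →
        (p.2.foldl (fun m q =>
          if (PySem.Set.ofList hits).contains q.1 then
            m.modify q.1 PySem.Dict.empty (fun row => row.insert p.1 q.2)
          else m) m).contains x = true := by
      intro x hx
      rw [PySem.Dict.contains_iff_mem_keys, h1, ← PySem.Dict.contains_iff_mem_keys]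
      exact h x hx
    rw [ih _ h', h1]

-- one posting list, projected onto file f, acts as a single conditional insert ------------------

theorem pv_posting_skip (e f : String) (l : List (String × Int)) (row : PySem.Dict String Int)
    (hf : f ∉ l.map (·.1)) :
    l.foldl (fun row q => if q.1 = f then row.insert e q.2 else row) row = row := by
  induction l generalizing row with
  | nil => rfl
  | cons q l ih =>
    simp only [List.map_cons, List.mem_cons, not_or] at hf
    simp only [List.foldl_cons]
    rw [if_neg (fun h => hf.1 h.symm), ih _ hf.2]

theorem pv_posting_step (e f : String) (l : List (String × Int)) (row : PySem.Dict String Int)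
    (hnd : (l.map (·.1)).Nodup) :
    l.foldl (fun row q => if q.1 = f then row.insert e q.2 else row) row =
      if (PySem.Dict.mk l).contains f then row.insert e ((PySem.Dict.mk l).getD f 0) else row := by
  induction l generalizing row with
  | nil => simp [PySem.Dict.contains_mk]
  | cons q l ih =>
    simp only [List.map_cons, List.nodup_cons] at hnd
    simp only [List.foldl_cons]
    by_cases hq : q.1 = f
    · rw [if_pos hq, pv_posting_skip _ _ _ _ (hq ▸ hnd.1)]
      have hc : (PySem.Dict.mk (q :: l)).contains f = true := by
        simp [PySem.Dict.contains_mk]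
        exact Or.inl hq
      rw [if_pos hc]
      have hv : (PySem.Dict.mk (q :: l)).getD f 0 = q.2 := by
        rw [PySem.Dict.getD_eq_get?_getD, PySem.Dict.get?_mk_cons]
        simp [hq]
      rw [hv]
    · rw [if_neg hq, ih _ hnd.2]
      have hcc : (PySem.Dict.mk (q :: l)).contains f = (PySem.Dict.mk l).contains f := by
        simp [PySem.Dict.contains_mk, hq]
      have hgg : (PySem.Dict.mk (q :: l)).getD f 0 = (PySem.Dict.mk l).getD f 0 := by
        rw [PySem.Dict.getD_eq_get?_getD, PySem.Dict.get?_mk_cons,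
            PySem.Dict.getD_eq_get?_getD]
        simp [hq]
      rw [hcc, hgg]

-- a dense row built by probing equals a zero row overwritten at the stored entries --------------

theorem pv_rows_eq (table : List (String × List (String × Int))) (f : String)
    (hnd : (table.map (·.1)).Nodup) :
    table.foldl (fun row p => row.insert p.1 ((PySem.Dict.mk p.2).getD f 0)) PySem.Dict.empty =
      table.foldl (fun row p =>
          if (PySem.Dict.mk p.2).contains f then
            row.insert p.1 ((PySem.Dict.mk p.2).getD f 0)
          else row)
        (table.foldl (fun row p => row.insert p.1 0) PySem.Dict.empty) := by
  have hkz : (table.foldl (fun row p => row.insert p.1 0)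
      (PySem.Dict.empty : PySem.Dict String Int)).keys
      = PySem.Set.update [] (table.map (·.1)) := by
    rw [PySem.Dict.keys_foldl_insert_key table (·.1) (fun _ _ => 0), PySem.Dict.keys_empty]
  have hkL : (table.foldl (fun row p => row.insert p.1 ((PySem.Dict.mk p.2).getD f 0))
      (PySem.Dict.empty : PySem.Dict String Int)).keys
      = PySem.Set.update [] (table.map (·.1)) := by
    rw [PySem.Dict.keys_foldl_insert_key table (·.1)
      (fun _ p => (PySem.Dict.mk p.2).getD f 0), PySem.Dict.keys_empty]
  have hcontz : ∀ p ∈ table, (table.foldl (fun row p => row.insert p.1 0)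
      (PySem.Dict.empty : PySem.Dict String Int)).contains p.1 = true := by
    intro p hp
    rw [PySem.Dict.contains_iff_mem_keys, hkz, PySem.Set.mem_update]
    exact Or.inr (List.mem_map_of_mem hp)
  have hkR : (table.foldl (fun row p =>
        if (PySem.Dict.mk p.2).contains f then
          row.insert p.1 ((PySem.Dict.mk p.2).getD f 0)
        else row)
      (table.foldl (fun row p => row.insert p.1 0) PySem.Dict.empty)).keys
      = PySem.Set.update [] (table.map (·.1)) := by
    rw [pv_keys_foldl_cond_sub (·.1) (fun p => (PySem.Dict.mk p.2).getD f 0)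
      (fun p => (PySem.Dict.mk p.2).contains f) table _ (fun p hp _ => hcontz p hp), hkz]
  have hndL : (table.foldl (fun row p => row.insert p.1 ((PySem.Dict.mk p.2).getD f 0))
      (PySem.Dict.empty : PySem.Dict String Int)).keys.Nodup := by
    apply PySem.Dict.nodup_keys_foldl_insert_key
    rw [PySem.Dict.keys_empty]
    exact List.nodup_nil
  have hndR : (table.foldl (fun row p =>
        if (PySem.Dict.mk p.2).contains f then
          row.insert p.1 ((PySem.Dict.mk p.2).getD f 0)
        else row)
      (table.foldl (fun row p => row.insert p.1 0) PySem.Dict.empty)).keys.Nodup := by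
    apply pv_nodup_keys_foldl_cond
    apply PySem.Dict.nodup_keys_foldl_insert_key
    rw [PySem.Dict.keys_empty]
    exact List.nodup_nil
  apply PySem.Dict.ext
  rw [PySem.Dict.items_eq_map_keys _ hndL 0, PySem.Dict.items_eq_map_keys _ hndR 0, hkL, hkR]
  apply List.map_congr_left
  intro x hx
  have hx' : x ∈ table.map (·.1) := by
    simpa [PySem.Set.mem_update] using hx
  obtain ⟨p, hp, rfl⟩ := List.mem_map.mp hx'
  have hL := pv_getD_uncond_mem (·.1) (fun p => (PySem.Dict.mk p.2).getD f 0) table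
    PySem.Dict.empty 0 hnd p hp
  have hz := pv_getD_uncond_mem (·.1) (fun _ => (0 : Int)) table PySem.Dict.empty 0 hnd p hp
  have hR := pv_getD_foldl_cond_mem (·.1) (fun p => (PySem.Dict.mk p.2).getD f 0)
    (fun p => (PySem.Dict.mk p.2).contains f) table
    (table.foldl (fun row p => row.insert p.1 0) PySem.Dict.empty) 0 hnd p hp
  dsimp only at hL hz hR ⊢
  rw [hL, hR]
  by_cases hc : (PySem.Dict.mk p.2).contains f = true
  · rw [if_pos hc]
  · rw [if_neg hc, hz, PySem.Dict.getD_of_not_contains _ _ (Bool.eq_false_iff.mpr hc)]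

-- ===== VERDICT (by name: the statement is the Claim_ definition above) =====
theorem pv_contains_ofList (hits : List String) (k : String) :
    (PySem.Set.ofList hits).contains k = true ↔ k ∈ hits := by
  have h : (PySem.Set.ofList hits).contains k = List.contains (PySem.Set.ofList hits) k := rfl
  rw [h]
  simp [PySem.Set.mem_ofList]

theorem getCorpusMatrix_spec : Claim_equal_getCorpusMatrix := by
  intro query table hits _ hpre
  obtain ⟨hnd, hinner⟩ := hpre
  unfold Spec_getCorpusMatrix getCorpusMatrix getCorpusMatrix_alt
  dsimp only
  suffices h : (hits.foldl (fun m file =>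
      m.insert file
        ((table.map (·.1)).foldl (fun row element =>
          if (PySem.Dict.mk ((PySem.Dict.mk table).getD element [])).contains file then
            row.insert element ((PySem.Dict.mk ((PySem.Dict.mk table).getD element [])).getD file 0)
          else row.insert element 0) PySem.Dict.empty))
      (PySem.Dict.empty : PySem.Dict String (PySem.Dict String Int))) =
      (table.foldl (fun m p =>
        p.2.foldl (fun m q =>
          if (PySem.Set.ofList hits).contains q.1 then
            m.modify q.1 PySem.Dict.empty (fun row => row.insert p.1 q.2)
          else m) m)
        (hits.foldl (fun m file =>
          m.insert file ((table.map (·.1)).foldl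
            (fun row element => row.insert element 0) PySem.Dict.empty))
          (PySem.Dict.empty : PySem.Dict String (PySem.Dict String Int)))) by
    rw [h]
  have hk0 : (hits.foldl (fun m file =>
      m.insert file ((table.map (·.1)).foldl
        (fun row element => row.insert element 0) PySem.Dict.empty))
      (PySem.Dict.empty : PySem.Dict String (PySem.Dict String Int))).keys
      = PySem.Set.update [] hits := by
    rw [PySem.Dict.keys_foldl_insert, PySem.Dict.keys_empty]
  have hm0c : ∀ x, (PySem.Set.ofList hits).contains x = true →
      (hits.foldl (fun m file =>
        m.insert file ((table.map (·.1)).foldl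
          (fun row element => row.insert element 0) PySem.Dict.empty))
        (PySem.Dict.empty : PySem.Dict String (PySem.Dict String Int))).contains x = true := by
    intro x hx
    rw [PySem.Dict.contains_iff_mem_keys, hk0, PySem.Set.mem_update]
    exact Or.inr ((pv_contains_ofList hits x).mp hx)
  have hkA : (hits.foldl (fun m file =>
      m.insert file
        ((table.map (·.1)).foldl (fun row element =>
          if (PySem.Dict.mk ((PySem.Dict.mk table).getD element [])).contains file then
            row.insert element ((PySem.Dict.mk ((PySem.Dict.mk table).getD element [])).getD file 0)
          else row.insert element 0) PySem.Dict.empty))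
      (PySem.Dict.empty : PySem.Dict String (PySem.Dict String Int))).keys
      = PySem.Set.update [] hits := by
    rw [PySem.Dict.keys_foldl_insert, PySem.Dict.keys_empty]
  have hkB : (table.foldl (fun m p =>
        p.2.foldl (fun m q =>
          if (PySem.Set.ofList hits).contains q.1 then
            m.modify q.1 PySem.Dict.empty (fun row => row.insert p.1 q.2)
          else m) m)
        (hits.foldl (fun m file =>
          m.insert file ((table.map (·.1)).foldl
            (fun row element => row.insert element 0) PySem.Dict.empty))
          (PySem.Dict.empty : PySem.Dict String (PySem.Dict String Int)))).keys
      = PySem.Set.update [] hits := by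
    rw [pv_scatter_keys hits table _ hm0c, hk0]
  have hndup : (PySem.Set.update ([] : List String) hits).Nodup := PySem.Set.nodup_ofList hits
  apply PySem.Dict.ext
  rw [PySem.Dict.items_eq_map_keys _ (hkA ▸ hndup) PySem.Dict.empty,
      PySem.Dict.items_eq_map_keys _ (hkB ▸ hndup) PySem.Dict.empty, hkA, hkB]
  apply List.map_congr_left
  intro k hk
  have hkhits : k ∈ hits := by
    rcases (PySem.Set.mem_update [] hits k).mp hk with h | h
    · cases h
    · exact h
  have hgA := pv_getD_foldl_insert_fun (fun file =>
      (table.map (·.1)).foldl (fun row element =>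
        if (PySem.Dict.mk ((PySem.Dict.mk table).getD element [])).contains file then
          row.insert element ((PySem.Dict.mk ((PySem.Dict.mk table).getD element [])).getD file 0)
        else row.insert element 0) PySem.Dict.empty)
      hits PySem.Dict.empty k PySem.Dict.empty
  have hg0 := pv_getD_foldl_insert_fun (fun _ =>
      (table.map (·.1)).foldl (fun row element => row.insert element (0 : Int)) PySem.Dict.empty)
      hits PySem.Dict.empty k PySem.Dict.empty

  rw [hgA, if_pos hkhits, pv_scatter_outer,
      if_pos ((pv_contains_ofList hits k).mpr hkhits), hg0, if_pos hkhits]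
  have hstepB : ∀ (acc : PySem.Dict String Int), ∀ p ∈ table,
      p.2.foldl (fun row q => if q.1 = k then row.insert p.1 q.2 else row) acc =
        (fun acc (p : String × List (String × Int)) =>
          if (PySem.Dict.mk p.2).contains k then
            acc.insert p.1 ((PySem.Dict.mk p.2).getD k 0)
          else acc) acc p := by
    intro acc p hp
    exact pv_posting_step p.1 k p.2 acc (hinner p hp)
  rw [PySem.List.foldl_congr_mem table _ _ _ hstepB, List.foldl_map]
  have hstepA : ∀ (acc : PySem.Dict String Int), ∀ p ∈ table,
      (fun (acc : PySem.Dict String Int) (p : String × List (String × Int)) =>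
        if (PySem.Dict.mk ((PySem.Dict.mk table).getD p.1 [])).contains k then
          acc.insert p.1 ((PySem.Dict.mk ((PySem.Dict.mk table).getD p.1 [])).getD k 0)
        else acc.insert p.1 0) acc p =
        (fun acc (p : String × List (String × Int)) =>
          acc.insert p.1 ((PySem.Dict.mk p.2).getD k 0)) acc p := by
    intro acc p hp
    have hmem : (p.1, p.2) ∈ (PySem.Dict.mk table).items := by simpa using hp
    have hndk : (PySem.Dict.mk table).keys.Nodup := by
      rw [PySem.Dict.keys_mk]
      exact hnd
    have hlook : (PySem.Dict.mk table).getD p.1 [] = p.2 :=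
      PySem.Dict.getD_of_mem_items _ hmem hndk []
    dsimp only
    rw [hlook]
    by_cases hc : (PySem.Dict.mk p.2).contains k = true
    · rw [if_pos hc]
    · rw [if_neg hc, PySem.Dict.getD_of_not_contains _ _ (Bool.eq_false_iff.mpr hc)]
  rw [PySem.List.foldl_congr_mem table _ _ _ hstepA, List.foldl_map]
  congr 1
  exact pv_rows_eq table k hnd
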